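-- pv_equiv track=rewrite | github.com/egementunca/identity-factory-api | scripts/import_big_identities.py | compute_eca57_permutation
-- ===== SOURCE A (Python) =====
-- from typing import Any, Dict, Generator, List, Optional, Tuple
--
-- def compute_eca57_permutation(gates: List[Tuple[int, int, int]], num_wires: int) -> List[int]:
--     """
--     Compute the permutation implemented by an ECA57 circuit.
--
--     Each gate [a, c1, c2] applies: if c1=1 and c2=0, flip wire a.
--     This is the NIMPLY function (Rule 57).
--     """
--     size = 1 << num_wires
--     perm = list(range(size))
--
--     for input_val in range(size):
--         output_val = input_val
--         for active, c1, c2 in gates: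
--             bit_c1 = (output_val >> c1) & 1
--             bit_c2 = (output_val >> c2) & 1
--             if bit_c1 == 1 and bit_c2 == 0:
--                 output_val ^= 1 << active
--         perm[input_val] = output_val
--
--     return perm
-- ===== SOURCE B (Python) =====
-- def compute_eca57_permutation(gates, num_wires):
--     size = 1 << num_wires
--
--     def apply_gate(gate, dom):
--         # sparse map of one gate, defined only on the values in dom
--         a, c1, c2 = gate
--         return {v: v ^ (1 << a) if (v >> c1) & 1 and not ((v >> c2) & 1) else v
--                 for v in dom}
--
--     def compose(gs, dom):
--         # sparse map of the whole gate list gs on dom (divide and conquer):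
--         # the right half only needs to be defined on the image of the left half
--         if not gs:
--             return {v: v for v in dom}
--         if len(gs) == 1:
--             return apply_gate(gs[0], dom)
--         mid = len(gs) // 2
--         left = compose(gs[:mid], dom)
--         right = compose(gs[mid:], set(left.values()))
--         return {v: right[left[v]] for v in dom}
--
--     m = compose(gates, range(size))
--     return [m[v] for v in range(size)]
-- ===== Notes on version B (the rewrite author's own statement) =====
-- stated objective: alternative
-- what changed: B replaces A's double loop (threading each input value through all gates with per-gate bit logic) by divide-and-conquer on the gate list: it builds sparse maps (dicts) of each half on the reachable domain and composes them by dictionary lookup.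
-- outside the precondition, e.g. on compute_eca57_permutation([(-1, 2, 7)], 1): A returns [0, 1], B returns [0, 1]
import Mathlib
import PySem

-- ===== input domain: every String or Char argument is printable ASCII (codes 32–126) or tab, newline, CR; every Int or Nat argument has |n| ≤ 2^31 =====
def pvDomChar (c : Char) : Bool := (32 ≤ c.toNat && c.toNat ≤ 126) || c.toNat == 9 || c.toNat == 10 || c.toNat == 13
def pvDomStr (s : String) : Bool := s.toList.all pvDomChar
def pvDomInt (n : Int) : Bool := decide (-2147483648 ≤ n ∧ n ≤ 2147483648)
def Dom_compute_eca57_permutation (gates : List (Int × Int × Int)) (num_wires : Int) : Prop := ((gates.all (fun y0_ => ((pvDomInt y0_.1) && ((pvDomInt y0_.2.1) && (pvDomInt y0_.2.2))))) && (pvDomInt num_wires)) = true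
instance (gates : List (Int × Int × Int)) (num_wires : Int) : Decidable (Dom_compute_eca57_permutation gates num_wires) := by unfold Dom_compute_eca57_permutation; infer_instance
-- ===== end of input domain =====

-- B replaces A's double loop (thread each input value through all gates with per-gate bit
-- logic) by divide-and-conquer on the gate list: it builds sparse maps (dicts) of each
-- half on the reachable domain and composes them by dictionary lookup.

-- ===== PORT A =====
-- inner gate loop of A: one gate applied to the running output_val
-- (values and shift amounts are nonnegative under Pre_, so Nat bit operations are exact)
def pvGateA (v : Nat) (g : Int × Int × Int) : Nat :=
  if (v >>> g.2.1.toNat) &&& 1 = 1 ∧ (v >>> g.2.2.toNat) &&& 1 = 0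
  then v ^^^ (1 <<< g.1.toNat) else v

def compute_eca57_permutation (gates : List (Int × Int × Int)) (num_wires : Int) : List Int :=
  let size := 1 <<< num_wires.toNat
  -- perm starts as range(size) and every entry perm[input_val] is overwritten with
  -- the fold of the gates over input_val
  (List.range size).map (fun input_val => (Int.ofNat (gates.foldl pvGateA input_val)))

-- ===== PORT B =====
-- apply_gate: the dict comprehension {v: ... for v in dom}, as its items list
-- (keys of dom are distinct wherever B builds one, so first-match lookup is exact)
def pvApplyGate (g : Int × Int × Int) (dom : List Nat) : List (Nat × Nat) :=
  dom.map (fun v =>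
    (v, if (v >>> g.2.1.toNat) &&& 1 ≠ 0 ∧ ¬ ((v >>> g.2.2.toNat) &&& 1 ≠ 0)
        then v ^^^ (1 <<< g.1.toNat) else v))

-- compose(gs, dom): divide and conquer over the gate list; the right half is built on
-- set(left.values()); 'right[left[v]]' is ported as first-match lookup with getD
-- (exact: the keys are present wherever B looks them up)
def pvComposeM (gs : List (Int × Int × Int)) (dom : List Nat) : List (Nat × Nat) :=
  match gs with
  | [] => dom.map (fun v => (v, v))
  | [g] => pvApplyGate g dom
  | g1 :: g2 :: rest =>
    let mid := (g1 :: g2 :: rest).length / 2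
    let left := pvComposeM ((g1 :: g2 :: rest).take mid) dom
    let right := pvComposeM ((g1 :: g2 :: rest).drop mid)
      (PySem.Set.ofList (left.map Prod.snd))
    dom.map (fun v => (v, (List.lookup ((List.lookup v left).getD 0) right).getD 0))
termination_by gs.length
decreasing_by
  · simp only [List.length_take, List.length_cons]; omega
  · simp only [List.length_drop, List.length_cons]; omega

def compute_eca57_permutation_alt (gates : List (Int × Int × Int)) (num_wires : Int) : List Int :=
  let size := 1 <<< num_wires.toNat
  let m := pvComposeM gates (List.range size)
  (List.range size).map (fun v => Int.ofNat ((List.lookup v m).getD 0))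

-- ===== PRECONDITION & SPEC =====
-- Pre_ excludes inputs with a negative num_wires or a negative gate component: Python A
-- raises ValueError ('negative shift count') on essentially all of them (a negative
-- num_wires or control always raises; a negative flip target raises as soon as its
-- condition fires, and both programs return the same identity list when it never fires).
def Pre_compute_eca57_permutation (gates : List (Int × Int × Int)) (num_wires : Int) : Prop :=
  0 ≤ num_wires ∧ ∀ g ∈ gates, 0 ≤ g.1 ∧ 0 ≤ g.2.1 ∧ 0 ≤ g.2.2
instance (gates : List (Int × Int × Int)) (num_wires : Int) : Decidable (Pre_compute_eca57_permutation gates num_wires) := by unfold Pre_compute_eca57_permutation; infer_instance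

def pvWitness_compute_eca57_permutation : (List (Int × Int × Int)) × Int := ([(0, 1, 2)], 2)

def Spec_compute_eca57_permutation (gates : List (Int × Int × Int)) (num_wires : Int) (out : List Int) : Prop := out = compute_eca57_permutation_alt gates num_wires
instance (gates : List (Int × Int × Int)) (num_wires : Int) (out : List Int) : Decidable (Spec_compute_eca57_permutation gates num_wires out) := by unfold Spec_compute_eca57_permutation; infer_instance

-- ===== CLAIM (what is proved, stated in full; the proofs are below) =====
def Claim_equal_compute_eca57_permutation : Prop := ∀ (gates : List (Int × Int × Int)) (num_wires : Int), Dom_compute_eca57_permutation gates num_wires → Pre_compute_eca57_permutation gates num_wires → Spec_compute_eca57_permutation gates num_wires (compute_eca57_permutation gates num_wires)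

-- ===== LEMMAS AND PROOFS =====

-- the two per-gate steps agree on every value
lemma pvGate_agree (g : Int × Int × Int) (v : Nat) :
    (if (v >>> g.2.1.toNat) &&& 1 ≠ 0 ∧ ¬ ((v >>> g.2.2.toNat) &&& 1 ≠ 0)
     then v ^^^ (1 <<< g.1.toNat) else v) = pvGateA v g := by
  simp only [pvGateA]
  rcases Nat.mod_two_eq_zero_or_one (v >>> g.2.1.toNat) with c1 | c1 <;>
    rcases Nat.mod_two_eq_zero_or_one (v >>> g.2.2.toNat) with c2 | c2 <;>
      simp [Nat.and_one_is_mod, c1, c2]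

-- first-match lookup in a graph-of-a-function items list returns the function's value
lemma pv_lookup_map_self {f : Nat → Nat} {l : List Nat} {x : Nat} (hx : x ∈ l) :
    List.lookup x (l.map (fun u => (u, f u))) = some (f x) := by
  induction l with
  | nil => cases hx
  | cons a t ih =>
      simp only [List.map_cons, List.lookup]
      by_cases h : x = a
      · subst h; simp
      · have hb : (x == a) = false := by simpa using h
        rw [hb]
        exact ih ((List.mem_cons.mp hx).resolve_left h)

-- the composed sparse map is the graph of the pointwise scalar fold on its domain
lemma pvComposeM_eq (gs : List (Int × Int × Int)) (dom : List Nat) :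
    pvComposeM gs dom = dom.map (fun v => (v, gs.foldl pvGateA v)) := by
  induction gs, dom using pvComposeM.induct with
  | case1 dom => rw [pvComposeM]; simp
  | case2 dom g =>
      simp only [pvComposeM, pvApplyGate, List.foldl_cons, List.foldl_nil]
      exact List.map_congr_left (fun v _ => by rw [pvGate_agree])
  | case3 dom g1 g2 rest mid left ih1 ih1' ih2 =>
      have hmid : mid = (g1 :: g2 :: rest).length / 2 := rfl
      have ih2' := ih2
      rw [show (left : List (Nat × Nat)) = pvComposeM (List.take mid (g1 :: g2 :: rest)) dom
            from rfl, ih1] at ih2'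
      rw [pvComposeM]
      rw [ih1, ← hmid, ih2']
      simp only [List.map_map, Function.comp_def]
      refine List.map_congr_left (fun v hv => ?_)
      rw [pv_lookup_map_self hv, Option.getD_some]
      have hmem : ((g1 :: g2 :: rest).take mid).foldl pvGateA v
          ∈ PySem.Set.ofList (dom.map (fun u => ((g1 :: g2 :: rest).take mid).foldl pvGateA u)) :=
        (PySem.Set.mem_ofList _ _).mpr (List.mem_map.mpr ⟨v, hv, rfl⟩)
      rw [pv_lookup_map_self hmem, Option.getD_some, ← List.foldl_append, List.take_append_drop]

-- ===== VERDICT (by name: the statement is the Claim_ definition above) =====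
theorem compute_eca57_permutation_spec : Claim_equal_compute_eca57_permutation := by
  intro gates num_wires _ _
  show _ = _
  simp only [compute_eca57_permutation, compute_eca57_permutation_alt, pvComposeM_eq]
  refine (List.map_congr_left (fun v hv => ?_)).symm
  rw [pv_lookup_map_self hv]
  simp
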